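-- pv_equiv track=rewrite | github.com/skykongkong8/CodingTest | Samsung_SW_test/q_21611.py | formulate_circulating_MAP
-- ===== SOURCE A (Python) =====
-- def formulate_circulating_MAP(N):
--     """
--     방금전까지 sprial MAP에 대해 따로 공부하고 왔다. 테크닉을 적용하여 보자.
--     """
--     dr = [0,1,0,-1]
--     dc = [1,0,-1,0]
--     cnt = 0
--     # spiralMAP = [[0]*N for _ in range(N)]
--     linearized_spiralMAP = [] # 왠지 이런게 필요할 것 같지 않아?
--     r = 0
--     c = 0
--
--     right = N-1
--     down = N-1
--     left = 0
--     up = 1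
--
--     direction = 0
--     for _ in range(N**2):
--
--         linearized_spiralMAP.append([r,c])
--
--         # spiralMAP[r][c] = (cnt - (N**2 -1))*(-1)
--         cnt += 1
--
--         if direction%4 == 0 and c == right:
--             direction += 1
--             right -= 1
--         elif direction%4 == 1 and r == down:
--             direction +=1
--             down -= 1
--         elif direction %4 == 2 and c == left:
--             direction +=1
--             left += 1
--         elif direction %4 == 3 and r == up:
--             direction += 1
--             up += 1
--
--         r += dr[direction%4]
--         c += dc[direction%4]
--
--     linearized_spiralMAP.reverse()
--     """
--     이러한 data를 가지고, 현재 문제 상황에 적용하여 보자.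
--     """
--     return linearized_spiralMAP #,spiralMAP
-- ===== SOURCE B (Python) =====
-- def formulate_circulating_MAP(N):
--     res = []
--     top, bottom, left, right = 0, N - 1, 0, N - 1
--     while top <= bottom and left <= right:
--         for c in range(left, right + 1):
--             res.append([top, c])
--         for r in range(top + 1, bottom + 1):
--             res.append([r, right])
--         if top < bottom and left < right:
--             for c in range(right - 1, left - 1, -1):
--                 res.append([bottom, c])
--             for r in range(bottom - 1, top, -1):
--                 res.append([r, left])
--         top += 1; bottom -= 1; left += 1; right -= 1
--     res.reverse()
--     return res
-- ===== Notes on version B (the rewrite author's own statement) =====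
-- stated objective: simpler
-- what changed: Replaced A's single-step walker (direction vector table, four mutable bounds and a turn counter advanced one cell per iteration of a quadratic-length loop) by layer peeling: emit each ring's four edges as whole range-runs between shrinking top/bottom/left/right bounds, then reverse.
-- outside the precondition, e.g. on formulate_circulating_MAP(-1): A returns [[0, 0]], B returns []; on formulate_circulating_MAP(-2): A returns [[0, 3], [0, 2], [0, 1], [0, 0]], B returns []
import Mathlib
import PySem

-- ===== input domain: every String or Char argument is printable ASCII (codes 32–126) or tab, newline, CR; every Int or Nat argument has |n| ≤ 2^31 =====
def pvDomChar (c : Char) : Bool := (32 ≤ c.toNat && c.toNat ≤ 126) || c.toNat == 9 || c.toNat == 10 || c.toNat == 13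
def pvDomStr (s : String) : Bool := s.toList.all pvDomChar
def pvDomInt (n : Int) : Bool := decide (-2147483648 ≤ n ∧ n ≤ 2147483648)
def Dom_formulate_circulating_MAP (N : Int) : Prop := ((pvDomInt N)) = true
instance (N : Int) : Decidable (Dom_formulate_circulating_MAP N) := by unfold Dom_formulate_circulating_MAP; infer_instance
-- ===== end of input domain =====

-- B builds the reversed spiral by peeling whole rings between four shrinking bounds
-- instead of A's one-cell-per-iteration walk; objective: simpler.

-- ===== PORT A =====
def pvDr : List Int := [0, 1, 0, -1]
def pvDc : List Int := [1, 0, -1, 0]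

def pvWalkA : Nat → Int → Int → Int → Int → Int → Int → Int → List (List Int)
  | 0, _, _, _, _, _, _, _ => []
  | Nat.succ k, r, c, right, down, left, up, d =>
    let s :=
      if PySem.Int.mod d 4 = 0 ∧ c = right then (d + 1, right - 1, down, left, up)
      else if PySem.Int.mod d 4 = 1 ∧ r = down then (d + 1, right, down - 1, left, up)
      else if PySem.Int.mod d 4 = 2 ∧ c = left then (d + 1, right, down, left + 1, up)
      else if PySem.Int.mod d 4 = 3 ∧ r = up then (d + 1, right, down, left, up + 1)
      else (d, right, down, left, up)
    [r, c] :: pvWalkA k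
      (r + (PySem.List.pyGet? pvDr (PySem.Int.mod s.1 4)).getD 0)
      (c + (PySem.List.pyGet? pvDc (PySem.Int.mod s.1 4)).getD 0)
      s.2.1 s.2.2.1 s.2.2.2.1 s.2.2.2.2 s.1


def formulate_circulating_MAP (N : Int) : List (List Int) :=
  (pvWalkA ((N ^ 2).toNat) 0 0 (N - 1) (N - 1) 0 1 0).reverse

-- ===== PORT B =====
-- the while-loop of Source B: emit one ring (four appended range-runs), shrink the bounds, recurse.
def pvLayers (top bottom left right : Int) : List (List Int) :=
  if _h : top ≤ bottom ∧ left ≤ right then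
    ((PySem.List.pyRange left (right + 1) 1).map (fun c => [top, c])
      ++ (PySem.List.pyRange (top + 1) (bottom + 1) 1).map (fun r => [r, right])
      ++ (if top < bottom ∧ left < right then
            (PySem.List.pyRange (right - 1) (left - 1) (-1)).map (fun c => [bottom, c])
              ++ (PySem.List.pyRange (bottom - 1) top (-1)).map (fun r => [r, left])
          else []))
      ++ pvLayers (top + 1) (bottom - 1) (left + 1) (right - 1)
  else []
  termination_by (bottom + 1 - top).toNat
  decreasing_by omega


def formulate_circulating_MAP_alt (N : Int) : List (List Int) :=
  (pvLayers 0 (N - 1) 0 (N - 1)).reverse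

-- ===== PRECONDITION & SPEC =====
-- Pre_ restricts to nonnegative N, the natural domain of a grid side length: for negative N,
-- A's quadratic-length walk still returns coordinate lists that describe no grid, while B's
-- layer loop naturally returns the empty list; those inputs are excluded.
def Pre_formulate_circulating_MAP (N : Int) : Prop := 0 ≤ N
instance (N : Int) : Decidable (Pre_formulate_circulating_MAP N) := by
  unfold Pre_formulate_circulating_MAP; infer_instance

def pvWitness_formulate_circulating_MAP : Int := 3

def Spec_formulate_circulating_MAP (N : Int) (out : List (List Int)) : Prop :=
  out = formulate_circulating_MAP_alt N
instance (N : Int) (out : List (List Int)) : Decidable (Spec_formulate_circulating_MAP N out) := by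
  unfold Spec_formulate_circulating_MAP; infer_instance

-- ===== CLAIM (what is proved, stated in full; the proofs are below) =====
def Claim_equal_formulate_circulating_MAP : Prop :=
  ∀ (N : Int), Dom_formulate_circulating_MAP N → Pre_formulate_circulating_MAP N →
    Spec_formulate_circulating_MAP N (formulate_circulating_MAP N)

-- ===== LEMMAS AND PROOFS =====

lemma pvMod4 (d : Int) : PySem.Int.mod d 4 = d % 4 :=
  PySem.Int.mod_eq_emod_of_pos (by norm_num)

lemma pvGetDr (j : Int) (h : j % 4 = 1) : (PySem.List.pyGet? pvDr (PySem.Int.mod j 4)).getD 0 = 1 := by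
  rw [pvMod4, h]; rfl

lemma pvSegR (k : Nat) (f : Nat) (r c down left up d : Int) (hd : d % 4 = 0) :
    pvWalkA (k + 1 + f) r c (c + k) down left up d =
      (PySem.List.pyRange c (c + k + 1) 1).map (fun x => [r, x])
        ++ pvWalkA f (r + 1) (c + k) (c + k - 1) down left up (d + 1) := by
  induction k generalizing c with
  | zero =>
    simp only [Nat.cast_zero, add_zero]
    rw [(by omega : 0 + 1 + f = f + 1), pvWalkA]
    rw [if_pos ⟨by rw [pvMod4, hd], by ring⟩]
    simp only []
    rw [pvGetDr (d+1) (by omega)]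
    have : (PySem.List.pyGet? pvDc (PySem.Int.mod (d+1) 4)).getD 0 = 0 := by
      rw [pvMod4, (by omega : (d+1) % 4 = 1)]; rfl
    rw [this]
    rw [PySem.List.pyRange_one_cons (by omega), PySem.List.pyRange_one_eq_nil (by omega)]
    simp
  | succ k ih =>
    rw [(by omega : k + 1 + 1 + f = (k + 1 + f) + 1), pvWalkA]
    simp only [pvMod4]
    rw [if_neg (by push_cast; omega), if_neg (by omega), if_neg (by omega), if_neg (by omega)]
    have h0 : (PySem.List.pyGet? pvDr (PySem.Int.mod d 4)).getD 0 = 0 := by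
      rw [pvMod4, hd]; rfl
    have h1 : (PySem.List.pyGet? pvDc (PySem.Int.mod d 4)).getD 0 = 1 := by
      rw [pvMod4, hd]; rfl
    rw [pvMod4] at h0 h1
    rw [h0, h1, add_zero]
    have e : (c + (↑(k + 1) : Int)) = (c + 1) + ↑k := by push_cast; ring
    rw [e, ih (c + 1)]
    conv_rhs => rw [PySem.List.pyRange_one_cons (by omega)]
    simp only [List.map_cons, List.cons_append]

lemma pvSegD (k : Nat) (f : Nat) (r c right left up d : Int) (hd : d % 4 = 1) :
    pvWalkA (k + 1 + f) r c right (r + k) left up d =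
      (PySem.List.pyRange r (r + k + 1) 1).map (fun x => [x, c])
        ++ pvWalkA f (r + k) (c - 1) right (r + k - 1) left up (d + 1) := by
  induction k generalizing r with
  | zero =>
    simp only [Nat.cast_zero, add_zero]
    rw [(by omega : 0 + 1 + f = f + 1), pvWalkA]
    rw [if_neg (by rw [pvMod4]; omega), if_pos (by rw [pvMod4]; exact ⟨hd, rfl⟩)]
    dsimp only
    have h0 : (PySem.List.pyGet? pvDr (PySem.Int.mod (d + 1) 4)).getD 0 = 0 := by
      rw [pvMod4, (by omega : (d + 1) % 4 = 2)]; rfl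
    have h1 : (PySem.List.pyGet? pvDc (PySem.Int.mod (d + 1) 4)).getD 0 = -1 := by
      rw [pvMod4, (by omega : (d + 1) % 4 = 2)]; rfl
    rw [h0, h1, add_zero]
    rw [PySem.List.pyRange_one_cons (by omega), PySem.List.pyRange_one_eq_nil (by omega)]
    simp [sub_eq_add_neg]
  | succ k ih =>
    rw [(by omega : k + 1 + 1 + f = (k + 1 + f) + 1), pvWalkA]
    rw [if_neg (by rw [pvMod4]; omega), if_neg (by rw [pvMod4]; push_cast; omega),
        if_neg (by rw [pvMod4]; omega), if_neg (by rw [pvMod4]; omega)]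
    dsimp only
    have h0 : (PySem.List.pyGet? pvDr (PySem.Int.mod d 4)).getD 0 = 1 := by
      rw [pvMod4, hd]; rfl
    have h1 : (PySem.List.pyGet? pvDc (PySem.Int.mod d 4)).getD 0 = 0 := by
      rw [pvMod4, hd]; rfl
    rw [h0, h1, add_zero]
    have e : (r + (↑(k + 1) : Int)) = (r + 1) + ↑k := by push_cast; ring
    rw [e, ih (r + 1)]
    conv_rhs => rw [PySem.List.pyRange_one_cons (by omega)]
    simp only [List.map_cons, List.cons_append]

lemma pvSegL (k : Nat) (f : Nat) (r c right down up d : Int) (hd : d % 4 = 2) :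
    pvWalkA (k + 1 + f) r c right down (c - k) up d =
      (PySem.List.pyRange c (c - k - 1) (-1)).map (fun x => [r, x])
        ++ pvWalkA f (r - 1) (c - k) right down (c - k + 1) up (d + 1) := by
  induction k generalizing c with
  | zero =>
    simp only [Nat.cast_zero, sub_zero]
    rw [(by omega : 0 + 1 + f = f + 1), pvWalkA]
    rw [if_neg (by rw [pvMod4]; omega), if_neg (by rw [pvMod4]; omega),
        if_pos (by rw [pvMod4]; exact ⟨hd, rfl⟩)]
    dsimp only
    have h0 : (PySem.List.pyGet? pvDr (PySem.Int.mod (d + 1) 4)).getD 0 = -1 := by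
      rw [pvMod4, (by omega : (d + 1) % 4 = 3)]; rfl
    have h1 : (PySem.List.pyGet? pvDc (PySem.Int.mod (d + 1) 4)).getD 0 = 0 := by
      rw [pvMod4, (by omega : (d + 1) % 4 = 3)]; rfl
    rw [h0, h1, add_zero]
    rw [PySem.List.pyRange_neg_one_cons (by omega), PySem.List.pyRange_neg_one_eq_nil (by omega)]
    simp [sub_eq_add_neg]
  | succ k ih =>
    rw [(by omega : k + 1 + 1 + f = (k + 1 + f) + 1), pvWalkA]
    rw [if_neg (by rw [pvMod4]; omega), if_neg (by rw [pvMod4]; omega),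
        if_neg (by rw [pvMod4]; push_cast; omega), if_neg (by rw [pvMod4]; omega)]
    dsimp only
    have h0 : (PySem.List.pyGet? pvDr (PySem.Int.mod d 4)).getD 0 = 0 := by
      rw [pvMod4, hd]; rfl
    have h1 : (PySem.List.pyGet? pvDc (PySem.Int.mod d 4)).getD 0 = -1 := by
      rw [pvMod4, hd]; rfl
    rw [h0, h1, add_zero]
    have e : (c - (↑(k + 1) : Int)) = (c - 1) - ↑k := by push_cast; ring
    rw [e, (by ring : c + -1 = c - 1), ih (c - 1)]
    conv_rhs => rw [PySem.List.pyRange_neg_one_cons (by omega)]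
    simp only [List.map_cons, List.cons_append]

lemma pvSegU (k : Nat) (f : Nat) (r c right down left d : Int) (hd : d % 4 = 3) :
    pvWalkA (k + 1 + f) r c right down left (r - k) d =
      (PySem.List.pyRange r (r - k - 1) (-1)).map (fun x => [x, c])
        ++ pvWalkA f (r - k) (c + 1) right down left (r - k + 1) (d + 1) := by
  induction k generalizing r with
  | zero =>
    simp only [Nat.cast_zero, sub_zero]
    rw [(by omega : 0 + 1 + f = f + 1), pvWalkA]
    rw [if_neg (by rw [pvMod4]; omega), if_neg (by rw [pvMod4]; omega),
        if_neg (by rw [pvMod4]; omega), if_pos (by rw [pvMod4]; exact ⟨hd, rfl⟩)]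
    dsimp only
    have h0 : (PySem.List.pyGet? pvDr (PySem.Int.mod (d + 1) 4)).getD 0 = 0 := by
      rw [pvMod4, (by omega : (d + 1) % 4 = 0)]; rfl
    have h1 : (PySem.List.pyGet? pvDc (PySem.Int.mod (d + 1) 4)).getD 0 = 1 := by
      rw [pvMod4, (by omega : (d + 1) % 4 = 0)]; rfl
    rw [h0, h1, add_zero]
    rw [PySem.List.pyRange_neg_one_cons (by omega), PySem.List.pyRange_neg_one_eq_nil (by omega)]
    simp
  | succ k ih =>
    rw [(by omega : k + 1 + 1 + f = (k + 1 + f) + 1), pvWalkA]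
    rw [if_neg (by rw [pvMod4]; omega), if_neg (by rw [pvMod4]; omega),
        if_neg (by rw [pvMod4]; omega), if_neg (by rw [pvMod4]; push_cast; omega)]
    dsimp only
    have h0 : (PySem.List.pyGet? pvDr (PySem.Int.mod d 4)).getD 0 = -1 := by
      rw [pvMod4, hd]; rfl
    have h1 : (PySem.List.pyGet? pvDc (PySem.Int.mod d 4)).getD 0 = 0 := by
      rw [pvMod4, hd]; rfl
    rw [h0, h1, add_zero]
    have e : (r - (↑(k + 1) : Int)) = (r - 1) - ↑k := by push_cast; ring
    rw [e, (by ring : r + -1 = r - 1), ih (r - 1)]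
    conv_rhs => rw [PySem.List.pyRange_neg_one_cons (by omega)]
    simp only [List.map_cons, List.cons_append]

lemma pvMain : ∀ (n : Nat) (o d : Int), d % 4 = 0 →
    pvWalkA (n * n) o o (o + n - 1) (o + n - 1) o (o + 1) d =
      pvLayers o (o + n - 1) o (o + n - 1) := by
  intro n
  induction n using Nat.strong_induction_on with
  | _ n ih =>
  intro o d hd
  match n with
  | 0 =>
    rw [pvLayers, dif_neg (by push_cast; omega)]
    rfl
  | 1 =>
    have c1 : (o + (↑(1:Nat)) - 1 : Int) = o := by push_cast; ring
    rw [c1]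
    have h1 := pvSegR 0 0 o o o o (o + 1) d hd
    norm_num at h1
    rw [(by norm_num : 1 * 1 = 0 + 1 + 0), h1]
    rw [pvLayers, dif_pos ⟨le_refl o, le_refl o⟩, if_neg (by omega)]
    rw [pvLayers, dif_neg (by omega)]
    rw [PySem.List.pyRange_one_singleton, PySem.List.pyRange_one_eq_nil (by omega)]
    simp [pvWalkA]
  | 2 =>
    have c1 : (o + (↑(2:Nat)) - 1 : Int) = o + 1 := by push_cast; ring
    rw [c1]
    have h1 := pvSegR 1 2 o o (o + 1) o (o + 1) d hd
    have h2 := pvSegD 0 1 (o + 1) (o + 1) o o (o + 1) (d + 1) (by omega)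
    have h3 := pvSegL 0 0 (o + 1) o o o (o + 1) (d + 2) (by omega)
    norm_num at h1 h2 h3
    rw [(by norm_num : 2 * 2 = 1 + 1 + 2), h1, h2, (by ring : d + 1 + 1 = d + 2), h3]
    rw [pvLayers, dif_pos ⟨by omega, by omega⟩, if_pos ⟨by omega, by omega⟩]
    rw [pvLayers, dif_neg (by omega)]
    have r1 : PySem.List.pyRange o (o - 1) (-1) = [o] := by
      rw [PySem.List.pyRange_neg_one_cons (by omega), PySem.List.pyRange_neg_one_eq_nil (by omega)]
    have r2 : PySem.List.pyRange (o + 1) (o + 1 + 1) 1 = [o + 1] := PySem.List.pyRange_one_singleton (o + 1)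
    simp [pvWalkA, r1, r2]
  | (m + 3) =>
    have c1 : (o + (↑(m + 3) : Int) - 1) = o + ↑(m + 2) := by push_cast; ring
    rw [c1]
    have h1 := pvSegR (m + 2) (m * m + 5 * m + 6) o o (o + ↑(m + 2)) o (o + 1) d hd
    rw [(by ring : (m + 3) * (m + 3) = (m + 2) + 1 + (m * m + 5 * m + 6)), h1]
    have h2 := pvSegD (m + 1) (m * m + 4 * m + 4) (o + 1) (o + ↑(m + 2)) (o + ↑(m + 2) - 1) o (o + 1) (d + 1) (by omega)
    rw [(show ((o + 1) + (↑(m + 1) : Int)) = o + ↑(m + 2) by push_cast; ring)] at h2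
    rw [(by ring : m * m + 5 * m + 6 = (m + 1) + 1 + (m * m + 4 * m + 4)), h2,
        (by ring : d + 1 + 1 = d + 2)]
    have h3 := pvSegL (m + 1) (m * m + 3 * m + 2) (o + ↑(m + 2)) (o + ↑(m + 2) - 1) (o + ↑(m + 2) - 1) (o + ↑(m + 2) - 1) (o + 1) (d + 2) (by omega)
    rw [(show ((o + ↑(m + 2) - 1) - (↑(m + 1) : Int)) = o by push_cast; ring)] at h3
    rw [(by ring : m * m + 4 * m + 4 = (m + 1) + 1 + (m * m + 3 * m + 2)), h3,
        (by ring : d + 2 + 1 = d + 3)]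
    have h4 := pvSegU m (m * m + 2 * m + 1) (o + ↑(m + 2) - 1) o (o + ↑(m + 2) - 1) (o + ↑(m + 2) - 1) (o + 1) (d + 3) (by omega)
    rw [(show ((o + ↑(m + 2) - 1) - (↑m : Int)) = o + 1 by push_cast; ring)] at h4
    rw [(show (o + 1 - 1 : Int) = o by ring)] at h4
    rw [(by ring : m * m + 3 * m + 2 = m + 1 + (m * m + 2 * m + 1)), h4,
        (by ring : d + 3 + 1 = d + 4)]
    have h5 := ih (m + 1) (by omega) (o + 1) (d + 4) (by omega)
    rw [(show ((o + 1) + (↑(m + 1) : Int) - 1) = o + ↑(m + 2) - 1 by push_cast; ring)] at h5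
    rw [(by ring : m * m + 2 * m + 1 = (m + 1) * (m + 1)), h5]
    conv_rhs => rw [pvLayers]
    rw [dif_pos ⟨by omega, by omega⟩, if_pos ⟨by omega, by omega⟩]
    simp [List.append_assoc]

-- ===== VERDICT (by name: the statement is the Claim_ definition above) =====
theorem formulate_circulating_MAP_spec : Claim_equal_formulate_circulating_MAP := by
  intro N _ hN
  unfold Spec_formulate_circulating_MAP formulate_circulating_MAP formulate_circulating_MAP_alt
  lift N to ℕ using hN with n
  have hm := pvMain n 0 0 rfl
  simp only [zero_add] at hm
  rw [(show (((n : Int)) ^ 2).toNat = n * n by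
        rw [(by push_cast; ring : ((n : Int) ^ 2) = ((n * n : ℕ) : ℤ)), Int.toNat_natCast]),
      hm]
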